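-- pv_equiv track=rewrite | github.com/andriisoldatenko/fan | aoc22/day_008/main_2.py | scenic_score
-- ===== SOURCE A (Python) =====
-- def scenic_score(vec, target):
--     pos = 0
--     for item in vec:
--         if target > item:
--             pos += 1
--         elif target <= item:
--             pos += 1
--             return pos
--     return pos
-- ===== SOURCE B (Python) =====
-- def scenic_score(vec, target):
--     # Right-to-left fold: score of a suffix. A tree >= target resets the
--     # suffix score to 1 (view blocked immediately); a smaller tree adds
--     # itself in front of the suffix, so the score grows by 1.
--     score = 0
--     for x in reversed(vec):
--         score = 1 if x >= target else score + 1
--     return score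
-- ===== Notes on version B (the rewrite author's own statement) =====
-- stated objective: alternative
-- what changed: Replaces A's left-to-right count-with-early-return loop by a right-to-left fold over the whole list that maintains the scenic score of the current suffix (reset to 1 on a blocking tree, +1 otherwise); no counter, no early exit, opposite traversal order.
import Mathlib
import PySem

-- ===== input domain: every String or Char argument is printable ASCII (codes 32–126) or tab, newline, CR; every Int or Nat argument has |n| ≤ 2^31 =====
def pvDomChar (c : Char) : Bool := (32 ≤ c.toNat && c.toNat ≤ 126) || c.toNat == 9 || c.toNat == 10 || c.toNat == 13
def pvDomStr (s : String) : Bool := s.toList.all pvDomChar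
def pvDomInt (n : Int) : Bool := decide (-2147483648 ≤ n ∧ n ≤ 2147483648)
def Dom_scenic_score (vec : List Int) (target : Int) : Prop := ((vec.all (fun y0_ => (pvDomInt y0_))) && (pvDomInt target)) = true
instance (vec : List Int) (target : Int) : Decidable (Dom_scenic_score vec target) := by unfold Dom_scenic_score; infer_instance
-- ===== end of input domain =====

-- B replaces A's left-to-right count-with-early-return by a right-to-left fold maintaining the suffix's scenic score; same cost, different traversal.
-- ===== PORT A =====
def scenic_score_loop (target : Int) : List Int → Int → Int
  | [], pos => pos
  | item :: rest, pos =>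
    if target > item then scenic_score_loop target rest (pos + 1)
    else pos + 1

def scenic_score (vec : List Int) (target : Int) : Int :=
  scenic_score_loop target vec 0

-- ===== PORT B =====
def scenic_score_alt (vec : List Int) (target : Int) : Int :=
  vec.reverse.foldl (fun score x => if x ≥ target then 1 else score + 1) 0

-- ===== PRECONDITION & SPEC =====
def Spec_scenic_score (vec : List Int) (target : Int) (out : Int) : Prop := out = scenic_score_alt vec target
instance (vec : List Int) (target : Int) (out : Int) : Decidable (Spec_scenic_score vec target out) := by unfold Spec_scenic_score; infer_instance

-- ===== CLAIM (what is proved, stated in full; the proofs are below) =====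
def Claim_equal_scenic_score : Prop := ∀ (vec : List Int) (target : Int), Dom_scenic_score vec target → Spec_scenic_score vec target (scenic_score vec target)

-- ===== LEMMAS AND PROOFS =====
theorem scenic_score_alt_cons (target x : Int) (rest : List Int) :
    scenic_score_alt (x :: rest) target =
      if x ≥ target then 1 else scenic_score_alt rest target + 1 := by
  unfold scenic_score_alt
  rw [List.reverse_cons, List.foldl_append]
  simp

theorem scenic_score_loop_eq (target : Int) (vec : List Int) (pos : Int) :
    scenic_score_loop target vec pos = pos + scenic_score_alt vec target := by
  induction vec generalizing pos with
  | nil => simp [scenic_score_loop, scenic_score_alt]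
  | cons item rest ih =>
    rw [scenic_score_alt_cons]
    by_cases h : target > item
    · rw [scenic_score_loop, if_pos h, ih, if_neg (by omega)]; omega
    · rw [scenic_score_loop, if_neg h, if_pos (by omega)]

-- ===== VERDICT (by name: the statement is the Claim_ definition above) =====
theorem scenic_score_spec : Claim_equal_scenic_score := by
  intro vec target _
  unfold Spec_scenic_score scenic_score
  rw [scenic_score_loop_eq]
  omega
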